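-- pv_equiv track=rewrite | github.com/luisola1218/luGEST | lugest_qt/services/laser_nesting.py | _expand_cells
-- ===== SOURCE A (Python) =====
-- def _expand_cells(cells: set[tuple[int, int]], radius_cells: int) -> set[tuple[int, int]]:
--     if radius_cells <= 0:
--         return set(cells)
--     out: set[tuple[int, int]] = set()
--     limit = max(0, int(radius_cells))
--     for cell_x, cell_y in list(cells or []):
--         for dy in range(-limit, limit + 1):
--             for dx in range(-limit, limit + 1):
--                 if (dx * dx) + (dy * dy) > (limit * limit):
--                     continue
--                 out.add((cell_x + dx, cell_y + dy))
--     return out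
-- ===== SOURCE B (Python) =====
-- def _expand_cells(cells, radius_cells):
--     if radius_cells <= 0:
--         return set(cells)
--     limit = max(0, int(radius_cells))
--     r2 = limit * limit
--     out = set()
--     for x, y in (cells or []):
--         # scanline rasterization of the disk: for each row offset dy the covered
--         # x-span is the contiguous interval [x - w, x + w], where w is the integer
--         # square root of r2 - dy*dy (no per-pixel membership test).
--         for dy in range(-limit, limit + 1):
--             s = r2 - dy * dy
--             w = 0
--             while (w + 1) * (w + 1) <= s:
--                 w += 1
--             for nx in range(x - w, x + w + 1):
--                 out.add((nx, y + dy))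
--     return out
-- ===== Notes on version B (the rewrite author's own statement) =====
-- stated objective: alternative
-- what changed: Replaces A's per-offset disk membership test over the full (2*limit+1)^2 square with scanline rasterization: for each row offset dy the covered x-interval [x-w, x+w] is computed directly via an integer square root w = isqrt(limit^2 - dy^2), so the inner loop runs only over the span and no dx*dx+dy*dy test exists.
import Mathlib
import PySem

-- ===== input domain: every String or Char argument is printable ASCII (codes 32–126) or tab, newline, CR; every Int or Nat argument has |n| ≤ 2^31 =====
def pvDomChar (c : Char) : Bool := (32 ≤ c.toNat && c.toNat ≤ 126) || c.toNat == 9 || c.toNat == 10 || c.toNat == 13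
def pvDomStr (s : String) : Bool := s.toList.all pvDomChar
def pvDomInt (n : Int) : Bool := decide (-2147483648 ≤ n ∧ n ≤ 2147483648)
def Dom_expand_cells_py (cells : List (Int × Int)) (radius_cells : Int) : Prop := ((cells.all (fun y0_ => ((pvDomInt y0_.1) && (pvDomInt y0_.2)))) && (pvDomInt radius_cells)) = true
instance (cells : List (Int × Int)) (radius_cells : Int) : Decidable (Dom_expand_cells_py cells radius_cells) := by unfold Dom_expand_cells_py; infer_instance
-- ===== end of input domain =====

-- B replaces A's per-offset disk membership test with scanline rasterization: per row offset dy
-- the covered x-interval is computed directly from an integer square root (same result, span loop only).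
-- ===== PORT A =====
def expand_cells_py (cells : List (Int × Int)) (radius_cells : Int) : List (Int × Int) :=
  if radius_cells ≤ 0 then PySem.Set.ofList cells
  else
    let limit : Int := max 0 radius_cells
    cells.foldl (fun out c =>
      (PySem.List.pyRange (-limit) (limit + 1) 1).foldl (fun out dy =>
        (PySem.List.pyRange (-limit) (limit + 1) 1).foldl (fun out dx =>
          if dx * dx + dy * dy > limit * limit then out
          else PySem.Set.add out (c.1 + dx, c.2 + dy)) out) out)
      PySem.Set.empty

-- ===== PORT B =====
-- the 'w = 0; while (w+1)*(w+1) <= s: w += 1' loop of Source B (w is a nonnegative counter)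
def pvIsqrtLoop (s : Int) (w : Nat) : Nat :=
  if ((w : Int) + 1) * ((w : Int) + 1) ≤ s then pvIsqrtLoop s (w + 1) else w
termination_by s.toNat - w
decreasing_by
  rename_i h
  have h1 : ((w : Int) + 1) * 1 ≤ ((w : Int) + 1) * ((w : Int) + 1) := by
    apply mul_le_mul_of_nonneg_left <;> omega
  omega

def expand_cells_py_alt (cells : List (Int × Int)) (radius_cells : Int) : List (Int × Int) :=
  if radius_cells ≤ 0 then PySem.Set.ofList cells
  else
    let limit : Int := max 0 radius_cells
    let r2 := limit * limit
    cells.foldl (fun out c =>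
      (PySem.List.pyRange (-limit) (limit + 1) 1).foldl (fun out dy =>
        let w : Int := (pvIsqrtLoop (r2 - dy * dy) 0 : Nat)
        (PySem.List.pyRange (c.1 - w) (c.1 + w + 1) 1).foldl
          (fun out nx => PySem.Set.add out (nx, c.2 + dy)) out) out)
      PySem.Set.empty

-- ===== PRECONDITION & SPEC =====
def Spec_expand_cells_py (cells : List (Int × Int)) (radius_cells : Int) (out : List (Int × Int)) : Prop := out = expand_cells_py_alt cells radius_cells
instance (cells : List (Int × Int)) (radius_cells : Int) (out : List (Int × Int)) : Decidable (Spec_expand_cells_py cells radius_cells out) := by unfold Spec_expand_cells_py; infer_instance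

-- ===== CLAIM (what is proved, stated in full; the proofs are below) =====
def Claim_equal_expand_cells_py : Prop := ∀ (cells : List (Int × Int)) (radius_cells : Int), Dom_expand_cells_py cells radius_cells → Spec_expand_cells_py cells radius_cells (expand_cells_py cells radius_cells)


-- ===== LEMMAS AND PROOFS =====

-- skip-branch fold equals fold over the filtered list
theorem foldl_skip_filter {α β : Type} (p : α → Prop) [DecidablePred p] (step : β → α → β) :
    ∀ (L : List α) (out : β),
      L.foldl (fun out x => if p x then out else step out x) out
        = (L.filter (fun x => decide (¬ p x))).foldl step out := by
  intro L
  induction L with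
  | nil => intro out; rfl
  | cons hd tl ih =>
    intro out
    by_cases hp : p hd <;> simp [hp, ih]

-- f-congruence for foldl
theorem foldl_congr_f {α β : Type} {f g : β → α → β} (h : ∀ b a, f b a = g b a) :
    ∀ (L : List α) (init : β), L.foldl f init = L.foldl g init := by
  intro L
  induction L with
  | nil => intro init; rfl
  | cons hd tl ih => intro init; simp only [List.foldl_cons, h, ih]

-- the while-loop computes the integer square root (bracketing spec)
theorem pvIsqrtLoop_spec (s : Int) :
    ∀ (w : Nat), ((w : Int)) * ((w : Int)) ≤ s →
      let r := pvIsqrtLoop s w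
      ((r : Int)) * ((r : Int)) ≤ s ∧ s < ((r : Int) + 1) * ((r : Int) + 1) := by
  intro w
  induction w using pvIsqrtLoop.induct s with
  | case1 w h ih =>
    intro _
    rw [pvIsqrtLoop, if_pos h]
    exact ih (by push_cast; linarith)
  | case2 w h =>
    intro hw
    rw [pvIsqrtLoop, if_neg h]
    exact ⟨hw, by omega⟩

-- a range shifted by a constant is the map of the shift
theorem pyRange_shift (a b t : Int) :
    PySem.List.pyRange (t + a) (t + b) 1 = (PySem.List.pyRange a b 1).map (fun x => t + x) := by
  simp only [PySem.List.pyRange_one, List.map_map]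
  have h : t + b - (t + a) = b - a := by ring
  rw [h]
  apply List.map_congr_left
  intro k _
  simp [Function.comp]; ring

-- the dx-filter of the full row is exactly the contiguous span [-w, w]
theorem filter_row_eq_span (L w s : Int) (hw0 : 0 ≤ w) (hwL : w ≤ L)
    (h1 : w * w ≤ s) (h2 : s < (w + 1) * (w + 1)) :
    (PySem.List.pyRange (-L) (L + 1) 1).filter (fun dx => decide (dx * dx ≤ s))
      = PySem.List.pyRange (-w) (w + 1) 1 := by
  rw [PySem.List.pyRange_one_append (-L) (-w) (L+1) (by omega) (by omega),
      PySem.List.pyRange_one_append (-w) (w+1) (L+1) (by omega) (by omega),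
      List.filter_append, List.filter_append]
  have hleft : (PySem.List.pyRange (-L) (-w) 1).filter (fun dx => decide (dx * dx ≤ s)) = [] := by
    rw [List.filter_eq_nil_iff]
    intro x hx
    rw [PySem.List.mem_pyRange_one] at hx
    simp only [decide_eq_true_eq]
    intro hc
    nlinarith
  have hright : (PySem.List.pyRange (w+1) (L+1) 1).filter (fun dx => decide (dx * dx ≤ s)) = [] := by
    rw [List.filter_eq_nil_iff]
    intro x hx
    rw [PySem.List.mem_pyRange_one] at hx
    simp only [decide_eq_true_eq]
    intro hc
    nlinarith
  have hmid : (PySem.List.pyRange (-w) (w+1) 1).filter (fun dx => decide (dx * dx ≤ s))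
      = PySem.List.pyRange (-w) (w+1) 1 := by
    rw [List.filter_eq_self]
    intro x hx
    rw [PySem.List.mem_pyRange_one] at hx
    simp only [decide_eq_true_eq]
    nlinarith
  rw [hleft, hright, hmid]
  simp

-- per-row step: A's skip-loop over the full row equals B's span loop
theorem row_step_eq (L dy : Int) (hdy : -L ≤ dy ∧ dy < L + 1) (c : Int × Int)
    (out : List (Int × Int)) :
    (PySem.List.pyRange (-L) (L + 1) 1).foldl (fun out dx =>
        if dx * dx + dy * dy > L * L then out
        else PySem.Set.add out (c.1 + dx, c.2 + dy)) out
      = (PySem.List.pyRange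
            (c.1 - ((pvIsqrtLoop (L * L - dy * dy) 0 : Nat) : Int))
            (c.1 + ((pvIsqrtLoop (L * L - dy * dy) 0 : Nat) : Int) + 1) 1).foldl
          (fun out nx => PySem.Set.add out (nx, c.2 + dy)) out := by
  have hdy2 : dy * dy ≤ L * L := by nlinarith
  obtain ⟨hw1, hw2⟩ := pvIsqrtLoop_spec (L * L - dy * dy) 0 (by simpa using (by linarith : (0:Int) ≤ L * L - dy * dy))
  set w : Int := ((pvIsqrtLoop (L * L - dy * dy) 0 : Nat) : Int) with hwdef
  have hw0 : 0 ≤ w := Int.natCast_nonneg _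
  have hwL : w ≤ L := by nlinarith
  rw [foldl_skip_filter (fun dx => dx * dx + dy * dy > L * L)
        (fun out dx => PySem.Set.add out (c.1 + dx, c.2 + dy))]
  rw [List.filter_congr (by
        intro x _
        apply decide_eq_decide.mpr
        constructor <;> intro h' <;> linarith :
      ∀ x ∈ PySem.List.pyRange (-L) (L + 1) 1,
        (decide (¬ x * x + dy * dy > L * L)) = decide (x * x ≤ L * L - dy * dy))]
  rw [filter_row_eq_span L w (L * L - dy * dy) hw0 hwL hw1 hw2]
  rw [show c.1 - w = c.1 + -w by ring, show c.1 + w + 1 = c.1 + (w + 1) by ring,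
      pyRange_shift, List.foldl_map]

-- ===== VERDICT (by name: the statement is the Claim_ definition above) =====
theorem expand_cells_py_spec : Claim_equal_expand_cells_py := by
  intro cells radius_cells _
  unfold Spec_expand_cells_py expand_cells_py expand_cells_py_alt
  by_cases h : radius_cells ≤ 0
  · simp [h]
  · simp only [h, if_false]
    apply foldl_congr_f
    intro out c
    apply PySem.List.foldl_congr_mem
    intro out' dy hdy
    rw [PySem.List.mem_pyRange_one] at hdy
    exact row_step_eq (max 0 radius_cells) dy ⟨hdy.1, hdy.2⟩ c out'
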